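-- pv_equiv track=rewrite | github.com/saharoktyan/saharo-cli | cli/saharo_cli/commands/services_cmd.py | _parse_service_codes
-- ===== SOURCE A (Python) =====
-- def _parse_service_codes(values: list[str]) -> list[str]:
--     out: list[str] = []
--     seen: set[str] = set()
--     for raw in values:
--         for part in str(raw).split(","):
--             code = part.strip().lower()
--             if not code or code in seen:
--                 continue
--             seen.add(code)
--             out.append(code)
--     return out
-- ===== SOURCE B (Python) =====
-- def _parse_service_codes(values: list[str]) -> list[str]:
--     # flat normalization pass; then map each code to its FIRST index by writing
--     # the enumerate pairs backwards (earlier indices overwrite later ones);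
--     # finally order the distinct codes by sorting on that first-occurrence index
--     codes = [part.strip().lower() for raw in values for part in str(raw).split(",")]
--     nonempty = [c for c in codes if c]
--     first = {c: i for i, c in reversed(list(enumerate(nonempty)))}
--     return sorted(first, key=lambda c: first[c])
-- ===== Notes on version B (the rewrite author's own statement) =====
-- stated objective: alternative
-- what changed: Replaces the streaming seen-set accumulator with a flat normalization pass, a first-occurrence index map built by writing enumerate pairs backwards so earlier indices overwrite, and a final sort of the distinct codes by that index.
import Mathlib
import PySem

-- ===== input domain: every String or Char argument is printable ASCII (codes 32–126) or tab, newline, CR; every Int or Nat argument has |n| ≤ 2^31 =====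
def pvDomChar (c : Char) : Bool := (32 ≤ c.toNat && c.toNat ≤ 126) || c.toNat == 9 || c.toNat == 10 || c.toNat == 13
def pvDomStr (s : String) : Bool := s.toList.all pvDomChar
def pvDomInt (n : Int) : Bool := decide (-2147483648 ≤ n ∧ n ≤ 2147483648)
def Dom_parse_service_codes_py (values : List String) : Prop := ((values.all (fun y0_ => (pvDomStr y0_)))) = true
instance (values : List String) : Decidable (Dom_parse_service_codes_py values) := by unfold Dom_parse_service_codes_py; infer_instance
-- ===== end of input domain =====

-- B replaces A's streaming seen-set accumulator by a flat normalization pass, a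
-- backwards-built first-occurrence index map, and a sort of the distinct codes by
-- that index; same results by a different algorithm (no speed claim).

-- ===== PORT A =====
-- raw.split(",") — the separator "," is nonempty, so split? always returns some
def pvSplit (raw : String) : List String := (PySem.Str.split? raw ",").getD []
-- part.strip().lower()
def pvNorm (part : String) : String := PySem.Str.lower (PySem.Str.strip part)
-- A's inner-loop body on the (out, seen) state
def pvStep (st : List String × PySem.Set String) (code : String) :
    List String × PySem.Set String :=
  if code == "" || PySem.Set.contains st.2 code then st
  else (st.1 ++ [code], PySem.Set.add st.2 code)

-- nested loop over values and comma-parts, skipping empty or already-seen codes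
def parse_service_codes_py (values : List String) : List String :=
  (values.foldl
    (fun (st : List String × PySem.Set String) raw =>
      (pvSplit raw).foldl (fun st part => pvStep st (pvNorm part)) st)
    ([], PySem.Set.empty)).1

-- ===== PORT B =====
-- the flat comprehension of normalized codes, and its nonempty sublist
def pvCodes (values : List String) : List String :=
  values.flatMap (fun raw => (pvSplit raw).map pvNorm)

-- {c: i for i, c in reversed(list(enumerate(nonempty)))} — earlier indices overwrite
def pvFirst (cs : List String) : PySem.Dict String Int :=
  ((PySem.List.enumerate cs 0).reverse).foldl (fun d p => d.insert p.2 p.1) PySem.Dict.empty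

-- sorted(first, key=lambda c: first[c]); every key is present in first, so
-- first[c] (which never raises here) is ported as getD with an unused default
def parse_service_codes_py_alt (values : List String) : List String :=
  let nonempty := (pvCodes values).filter (fun c => !(c == ""))
  let first := pvFirst nonempty
  PySem.List.sorted first.keys (fun c => first.getD c 0) false

-- ===== PRECONDITION & SPEC =====
def Spec_parse_service_codes_py (values : List String) (out : List String) : Prop := out = parse_service_codes_py_alt values
instance (values : List String) (out : List String) : Decidable (Spec_parse_service_codes_py values out) := by unfold Spec_parse_service_codes_py; infer_instance

-- ===== CLAIM (what is proved, stated in full; the proofs are below) =====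
def Claim_equal_parse_service_codes_py : Prop := ∀ (values : List String), Dom_parse_service_codes_py values → Spec_parse_service_codes_py values (parse_service_codes_py values)

-- ===== LEMMAS AND PROOFS =====

-- A's step, viewed on a single set: skip empties, Set.add the rest
def pvG (s : PySem.Set String) (c : String) : PySem.Set String :=
  if c == "" then s else PySem.Set.add s c

-- one A-step on a duplicated state (s, s) is pvG on both components
lemma pvStep_pair (s : PySem.Set String) (c : String) :
    pvStep (s, s) c = (pvG s c, pvG s c) := by
  unfold pvStep pvG
  by_cases h0 : c == ""
  · simp [h0]
  · by_cases hc : PySem.Set.contains s c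
    · have hmem : c ∈ s := by simpa using hc
      simp [h0, hmem, PySem.Set.add]
    · have hmem : c ∉ s := by simpa using hc
      simp [h0, hmem, PySem.Set.add]

-- A's paired fold stays duplicated: it is the pvG fold on both components
lemma pvPairFold (cs : List String) (s : PySem.Set String) :
    cs.foldl pvStep (s, s) = (cs.foldl pvG s, cs.foldl pvG s) := by
  induction cs generalizing s with
  | nil => rfl
  | cons c cs ih =>
      simp only [List.foldl_cons, pvStep_pair]
      exact ih (pvG s c)

-- folding Set.add over the filtered code list is folding pvG over all codes
lemma pvFilterFold (cs : List String) (s : PySem.Set String) :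
    (cs.filter (fun c => !(c == ""))).foldl PySem.Set.add s = cs.foldl pvG s := by
  induction cs generalizing s with
  | nil => rfl
  | cons c cs ih =>
      by_cases h0 : c == ""
      · have hstr : c = "" := by simpa using h0
        simp [pvG, hstr]
        exact ih s
      · simp [h0, pvG]
        exact ih (PySem.Set.add s c)

-- A's nested fold is the fold of pvStep over the flattened normalized codes
lemma pvNestedFold (raws : List String) (st : List String × PySem.Set String) :
    raws.foldl
      (fun st raw => (pvSplit raw).foldl (fun st part => pvStep st (pvNorm part)) st) st
    = (raws.flatMap (fun raw => (pvSplit raw).map pvNorm)).foldl pvStep st := by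
  induction raws generalizing st with
  | nil => rfl
  | cons r rs ih =>
      simp only [List.flatMap_cons, List.foldl_append, List.foldl_cons, List.foldl_map]
      exact ih _

-- elements already in the set are no-ops for the Set.add fold
lemma pvAddFold_filter (cs : List String) (s : PySem.Set String) (c : String) (hc : c ∈ s) :
    cs.foldl PySem.Set.add s = (cs.filter (fun x => !(x == c))).foldl PySem.Set.add s := by
  induction cs generalizing s with
  | nil => rfl
  | cons x cs ih =>
      by_cases hx : x == c
      · have hxc : x = c := by simpa using hx
        have h1 : PySem.Set.add s x = s := by
          unfold PySem.Set.add
          rw [if_pos]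
          simpa [hxc] using hc
        simp only [List.filter_cons, hx, Bool.not_true, List.foldl_cons, h1]
        exact ih s hc
      · have hfx : (!(x == c)) = true := by simp [hx]
        simp only [List.filter_cons, hfx, List.foldl_cons, if_pos]
        have hc2 : c ∈ PySem.Set.add s x := by
          unfold PySem.Set.add
          by_cases h : PySem.Set.contains s x <;> simp [h] <;> split <;> simp [hc]
        exact ih (PySem.Set.add s x) hc2

-- a head element absent from the rest of the fold's input is preserved in place
lemma pvAddFold_cons (ds : List String) (c : String) (s : PySem.Set String)
    (h : ∀ x ∈ ds, ¬ (x == c) = true) :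
    ds.foldl PySem.Set.add (c :: s) = c :: ds.foldl PySem.Set.add s := by
  induction ds generalizing s with
  | nil => rfl
  | cons x ds ih =>
      have hx : ¬ (x == c) = true := h x (by simp)
      have hadd : PySem.Set.add (c :: s) x = c :: PySem.Set.add s x := by
        unfold PySem.Set.add
        have hcc : PySem.Set.contains (c :: s) x = PySem.Set.contains s x := by
          unfold PySem.Set.contains
          simp only [List.contains_cons]
          have : (x == c) = false := by simpa using hx
          simp [this]
        rw [hcc]
        by_cases hcs : PySem.Set.contains s x <;> simp [hcs] <;> split <;> rfl
      simp only [List.foldl_cons, hadd]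
      exact ih (PySem.Set.add s x) (fun y hy => h y (by simp [hy]))

-- first-occurrence dedup of a cons: head, then dedup with later copies removed
lemma pvOfList_cons (c : String) (cs : List String) :
    PySem.Set.ofList (c :: cs)
      = c :: PySem.Set.ofList (cs.filter (fun x => !(x == c))) := by
  rw [PySem.Set.ofList_eq_foldl, PySem.Set.ofList_eq_foldl]
  simp only [List.foldl_cons]
  have h1 : PySem.Set.add ([] : PySem.Set String) c = [c] := by
    simp [PySem.Set.add, PySem.Set.contains]
  rw [h1, pvAddFold_filter cs [c] c (by simp)]
  exact pvAddFold_cons _ c [] (fun x hx => by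
    have := List.of_mem_filter hx
    simpa using this)

-- B's elimination dedup computes dict.fromkeys of the nonempty codes
-- the backwards insert fold maps each member of cs to its first index (offset s)
lemma pvFirstFold_get? (cs : List String) (s : Int) (d : PySem.Dict String Int) (c : String) :
    (((PySem.List.enumerate cs s).reverse).foldl (fun d p => d.insert p.2 p.1) d).get? c
      = if c ∈ cs then some (s + (cs.idxOf c : Int)) else d.get? c := by
  induction cs generalizing s d with
  | nil => simp [PySem.List.enumerate_nil]
  | cons x cs ih =>
      rw [PySem.List.enumerate_cons, List.reverse_cons, List.foldl_append]
      simp only [List.foldl_cons, List.foldl_nil]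
      by_cases hc : c = x
      · subst hc
        rw [PySem.Dict.get?_insert_self]
        simp [List.idxOf_cons_self]
      · rw [PySem.Dict.get?_insert_of_ne _ _ hc, ih]
        by_cases hm : c ∈ cs
        · have hm' : c ∈ x :: cs := List.mem_cons_of_mem _ hm
          have hidx : (x :: cs).idxOf c = cs.idxOf c + 1 := List.idxOf_cons_ne _ (by simpa using (Ne.symm hc))
          simp only [hm, hm', if_pos, hidx]
          congr 1
          push_cast
          ring
        · have hm' : c ∉ x :: cs := by simp [hc, hm]
          simp [hm, hm']

-- the keys of the backwards fold: the distinct codes, from the reversed list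
lemma pvFirst_keys (cs : List String) :
    (pvFirst cs).keys = PySem.Set.ofList cs.reverse := by
  unfold pvFirst
  rw [PySem.Dict.keys_foldl_insert_key ((PySem.List.enumerate cs 0).reverse)
        (fun p => p.2) (fun _ p => p.1) PySem.Dict.empty]
  rw [PySem.Set.ofList_eq_foldl]
  simp [PySem.Dict.keys_empty, PySem.Set.update, PySem.List.map_snd_enumerate, List.map_reverse]

-- filtering preserves the relative order of first occurrences
lemma pvIdxOf_filter_mono (cs : List String) (p : String → Bool) (a b : String)
    (ha : a ∈ cs.filter p) (hb : b ∈ cs.filter p)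
    (h : (cs.filter p).idxOf a < (cs.filter p).idxOf b) :
    cs.idxOf a < cs.idxOf b := by
  induction cs with
  | nil => simp at ha
  | cons x cs ih =>
      by_cases hpx : p x = true
      · rw [List.filter_cons_of_pos hpx] at ha hb h
        by_cases hax : a = x
        · subst hax
          have hba : b ≠ a := by
            intro e
            subst e
            simp [List.idxOf_cons_self] at h
          rw [List.idxOf_cons_self, List.idxOf_cons_ne _ (Ne.symm hba)]
          exact Nat.succ_pos _
        · by_cases hbx : b = x
          · subst hbx
            rw [List.idxOf_cons_self, List.idxOf_cons_ne _ (fun e => hax e.symm)] at h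
            exact absurd h (Nat.not_lt_zero _)
          · have ha' : a ∈ cs.filter p := by
              rcases List.mem_cons.mp ha with e | m
              · exact absurd e hax
              · exact m
            have hb' : b ∈ cs.filter p := by
              rcases List.mem_cons.mp hb with e | m
              · exact absurd e hbx
              · exact m
            rw [List.idxOf_cons_ne _ (by simpa using Ne.symm hax),
                List.idxOf_cons_ne _ (by simpa using Ne.symm hbx)] at h ⊢
            exact Nat.succ_lt_succ (ih ha' hb' (Nat.lt_of_succ_lt_succ h))
      · rw [List.filter_cons_of_neg (by simpa using hpx)] at ha hb h
        have hax : a ≠ x := by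
          intro e
          exact hpx (by rw [← e]; exact (List.mem_filter.mp ha).2)
        have hbx : b ≠ x := by
          intro e
          exact hpx (by rw [← e]; exact (List.mem_filter.mp hb).2)
        rw [List.idxOf_cons_ne _ (by simpa using Ne.symm hax),
            List.idxOf_cons_ne _ (by simpa using Ne.symm hbx)]
        exact Nat.succ_lt_succ (ih ha hb h)

-- along first-occurrence dedup order, the first index strictly increases
lemma pvOfList_pairwise_idxOf_aux (n : Nat) (cs : List String) (hn : cs.length ≤ n) :
    (PySem.Set.ofList cs).Pairwise (fun a b => cs.idxOf a < cs.idxOf b) := by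
  induction n generalizing cs with
  | zero =>
      have : cs = [] := List.length_eq_zero_iff.mp (Nat.le_zero.mp hn)
      subst this
      simp [PySem.Set.ofList]
  | succ n ihn =>
      match cs with
      | [] => simp [PySem.Set.ofList]
      | x :: cs =>
      have hlen : (cs.filter (fun y => !(y == x))).length ≤ n :=
        le_trans (List.length_filter_le _ _) (Nat.lt_succ_iff.mp (by simpa using hn))
      rw [pvOfList_cons]
      refine List.Pairwise.cons ?_ ?_
      · intro b hb
        have hbf : b ∈ cs.filter (fun y => !(y == x)) := by
          simpa [PySem.Set.mem_ofList] using hb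
        have hbx : b ≠ x := by simpa using (List.mem_filter.mp hbf).2
        rw [List.idxOf_cons_self, List.idxOf_cons_ne _ (by simpa using Ne.symm hbx)]
        exact Nat.succ_pos _
      · have ihp := ihn (cs.filter (fun y => !(y == x))) hlen
        refine List.Pairwise.imp_of_mem ?_ ihp
        intro a b hma hmb hab
        have haf : a ∈ cs.filter (fun y => !(y == x)) := by
          simpa [PySem.Set.mem_ofList] using hma
        have hbf : b ∈ cs.filter (fun y => !(y == x)) := by
          simpa [PySem.Set.mem_ofList] using hmb
        have hax : a ≠ x := by simpa using (List.mem_filter.mp haf).2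
        have hbx : b ≠ x := by simpa using (List.mem_filter.mp hbf).2
        rw [List.idxOf_cons_ne _ (by simpa using Ne.symm hax),
            List.idxOf_cons_ne _ (by simpa using Ne.symm hbx)]
        exact Nat.succ_lt_succ (pvIdxOf_filter_mono cs _ a b haf hbf hab)

-- B computes dict.fromkeys of the nonempty codes: its sort reproduces dedup order
lemma pvAlt_eq_dedup (cs : List String) :
    PySem.List.sorted (pvFirst cs).keys (fun c => (pvFirst cs).getD c 0) false
      = PySem.List.dedup cs := by
  have hgetD : ∀ c ∈ cs, (pvFirst cs).getD c 0 = (cs.idxOf c : Int) := by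
    intro c hc
    have h := pvFirstFold_get? cs 0 PySem.Dict.empty c
    unfold pvFirst
    rw [PySem.Dict.getD_eq_get?_getD, h, if_pos hc]
    simp
  have hperm : (PySem.List.dedup cs).Perm (pvFirst cs).keys := by
    rw [pvFirst_keys, PySem.List.dedup_eq_ofList]
    refine (List.perm_ext_iff_of_nodup (PySem.Set.nodup_ofList _) (PySem.Set.nodup_ofList _)).mpr ?_
    intro a
    simp [PySem.Set.mem_ofList]
  have hpw : (PySem.List.dedup cs).Pairwise
      (fun a b => (pvFirst cs).getD a 0 < (pvFirst cs).getD b 0) := by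
    rw [PySem.List.dedup_eq_ofList]
    refine List.Pairwise.imp_of_mem ?_ (pvOfList_pairwise_idxOf_aux cs.length cs le_rfl)
    intro a b hma hmb hab
    have hac : a ∈ cs := (PySem.Set.mem_ofList _ _).mp hma
    have hbc : b ∈ cs := (PySem.Set.mem_ofList _ _).mp hmb
    rw [hgetD a hac, hgetD b hbc]
    exact_mod_cast hab
  exact PySem.List.sorted_eq_of_perm_of_pairwise_lt _ _ _ hperm hpw

-- ===== VERDICT (by name: the statement is the Claim_ definition above) =====
theorem parse_service_codes_py_spec : Claim_equal_parse_service_codes_py := by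
  intro values _
  unfold Spec_parse_service_codes_py parse_service_codes_py parse_service_codes_py_alt
  rw [pvAlt_eq_dedup, PySem.List.dedup_eq_ofList, PySem.Set.ofList_eq_foldl, pvFilterFold,
      pvNestedFold]
  have h := pvPairFold ((pvCodes values)) PySem.Set.empty
  unfold pvCodes at h ⊢
  simp only [PySem.Set.empty] at h ⊢
  rw [h]
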